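-- pv_equiv track=rewrite | github.com/joncampbell123/a-pile-of-documentation | apodlib/docMarkdown.py | splittablecols
-- ===== SOURCE A (Python) =====
-- def findunescaped(line,what,start):
--     ei = -1
--     i = line.find(what,start)
--     while True:
--         if i > 0 and line[i-1] == '\\':
--             start = i+1
--             i = line.find(what,start)
--         else:
--             ei = i
--             break
--     return ei
--
-- def splittablecols(line):
--     line = line.strip()
--     r = [ ]
--     i = 0
--     #
--     if len(line) > 0 and line[0] == '|':
--         line = line[1:]
--     #
--     if len(line) > 1 and line[-1] == '|' and not line[-2] == '\\|':
--         line = line[0:len(line)-1]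
--     #
--     while i < len(line):
--         j = findunescaped(line,'|',i)
--         if j < 0:
--             j = len(line)
--         #
--         r.append(line[i:j])
--         i = j+1
--     #
--     return r
-- ===== SOURCE B (Python) =====
-- import re
--
-- def splittablecols(line):
--     line = line.strip()
--     if line.startswith('|'):
--         line = line[1:]
--     if len(line) > 1 and line.endswith('|'):
--         line = line[:-1]
--     if not line:
--         return []
--     parts = re.split(r'(?<!\\)\|', line)
--     if parts[-1] == '':
--         parts.pop()  # a trailing unescaped '|' opens no column
--     return parts
-- ===== Notes on version B (the rewrite author's own statement) =====
-- stated objective: idiomatic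
-- what changed: Replaces A's findunescaped helper and index-jumping while loop (find, re-find past escaped pipes, slice between hits) with a single regex split on pipes not preceded by a backslash, plus popping the empty field a trailing unescaped pipe would open.
import Mathlib
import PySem

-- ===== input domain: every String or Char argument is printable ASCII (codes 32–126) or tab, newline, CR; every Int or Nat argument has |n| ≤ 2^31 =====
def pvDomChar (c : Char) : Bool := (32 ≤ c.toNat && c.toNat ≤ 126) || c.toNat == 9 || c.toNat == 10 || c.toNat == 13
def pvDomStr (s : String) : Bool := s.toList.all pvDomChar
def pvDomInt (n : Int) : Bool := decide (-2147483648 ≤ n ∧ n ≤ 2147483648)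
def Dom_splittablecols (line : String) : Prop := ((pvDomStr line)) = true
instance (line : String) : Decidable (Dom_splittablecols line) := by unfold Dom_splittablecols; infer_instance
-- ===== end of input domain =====

-- B replaces A's find/advance scanner (helper findunescaped + while loop over indices) by a
-- single regex split on unescaped pipes plus a trailing-empty-field pop; same return value.

-- ===== PORT A =====
-- the while loop of findunescaped: each escaped hit restarts the find strictly further right,
-- so (len line + 1) iterations always suffice (fuel is only a termination crutch)
def findunescapedGo (line what : String) (fuel : Nat) (start : Int) : Int :=
  match fuel with
  | 0 => -1
  | fuel + 1 =>
    let i := PySem.Str.findFrom line what start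
    if i > 0 ∧ PySem.Str.pyGet? line (i - 1) = some '\\' then
      findunescapedGo line what fuel (i + 1)
    else i

def findunescaped (line what : String) (start : Int) : Int :=
  findunescapedGo line what ((PySem.Str.len line).toNat + 1) start

-- the main while loop of A; i advances by at least 1 each iteration, so fuel (len+1) suffices
def splitGoA (line : String) (fuel : Nat) (i : Int) (r : List String) : List String :=
  match fuel with
  | 0 => r
  | fuel + 1 =>
    if i < PySem.Str.len line then
      let j0 := findunescaped line "|" i
      let j := if j0 < 0 then PySem.Str.len line else j0
      splitGoA line fuel (j + 1) (r ++ [PySem.Str.slice line (some i) (some j)])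
    else r

def splittablecols (line : String) : List String :=
  let line := PySem.Str.strip line
  let line :=
    if PySem.Str.len line > 0 ∧ PySem.Str.pyGet? line 0 = some '|' then
      PySem.Str.slice line (some 1) none
    else line
  -- line[-2] is a 1-char string, "\\|" has 2 chars: the comparison is Python's, kept literally
  let line :=
    if PySem.Str.len line > 1 ∧ PySem.Str.pyGet? line (-1) = some '|' ∧
        ¬ ((PySem.Str.pyGet? line (-2)).map (fun c => [c]) = some ['\\', '|']) then
      PySem.Str.slice line (some 0) (some (PySem.Str.len line - 1))
    else line
  splitGoA line ((PySem.Str.len line).toNat + 1) 0 []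

-- ===== PORT B =====
-- port of the library call re.split(r'(?<!\\)\|', line): split at every '|' whose
-- predecessor is not '\'; `prev` is the predecessor of the head of the remaining list
def resplitPipe (prev : Option Char) (l : List Char) : List (List Char) :=
  match l with
  | [] => [[]]
  | c :: cs =>
    if c = '|' ∧ prev ≠ some '\\' then [] :: resplitPipe (some c) cs
    else
      match resplitPipe (some c) cs with
      | f :: rest => (c :: f) :: rest
      | [] => [[c]]

def splittablecols_alt (line : String) : List String :=
  let line := PySem.Str.strip line
  let line := if PySem.Str.startswith line "|" then PySem.Str.slice line (some 1) none else line
  let line :=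
    if PySem.Str.len line > 1 ∧ PySem.Str.endswith line "|" then
      PySem.Str.slice line none (some (-1))
    else line
  if line = "" then []
  else
    let parts := (resplitPipe none line.toList).map String.ofList
    if parts.getLast? = some "" then parts.dropLast else parts

-- ===== PRECONDITION & SPEC =====
def Spec_splittablecols (line : String) (out : List String) : Prop := out = splittablecols_alt line
instance (line : String) (out : List String) : Decidable (Spec_splittablecols line out) := by unfold Spec_splittablecols; infer_instance

-- ===== CLAIM (what is proved, stated in full; the proofs are below) =====
def Claim_equal_splittablecols : Prop := ∀ (line : String), Dom_splittablecols line → Spec_splittablecols line (splittablecols line)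

-- ===== LEMMAS AND PROOFS =====

-- index of the first unescaped '|' in l, where prev is the char before l's head
def firstU (prev : Option Char) (l : List Char) : Option Nat :=
  match l with
  | [] => none
  | c :: cs =>
    if c = '|' ∧ prev ≠ some '\\' then some 0
    else (firstU (some c) cs).map (· + 1)

-- the char preceding position i of s (none at i = 0)
def prevA (s : List Char) (i : Nat) : Option Char := if i = 0 then none else s[i - 1]?

-- drop a trailing empty field
def dropTrail (L : List (List Char)) : List (List Char) :=
  if L.getLast? = some [] then L.dropLast else L

theorem firstU_eq_none (prev : Option Char) (l : List Char) (h : '|' ∉ l) :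
    firstU prev l = none := by
  induction l generalizing prev with
  | nil => rfl
  | cons c cs ih =>
    simp only [List.mem_cons, not_or] at h
    have hc : ¬(c = '|' ∧ prev ≠ some '\\') := fun hcc => h.1 hcc.1.symm
    simp [firstU, hc, ih _ h.2]

theorem firstU_decomp (l : List Char) (p : Nat) (prev : Option Char)
    (hp : l[p]? = some '|') (hmin : ∀ q < p, l[q]? ≠ some '|') :
    firstU prev l =
      if (if p = 0 then prev else l[p - 1]?) = some '\\' then
        (firstU (some '|') (l.drop (p + 1))).map (· + (p + 1))
      else some p := by
  induction l generalizing p prev with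
  | nil => simp at hp
  | cons c cs ih =>
    cases p with
    | zero =>
      simp only [List.getElem?_cons_zero, Option.some.injEq] at hp
      subst hp
      by_cases hpr : prev = some '\\'
      · simp [firstU, hpr]
      · simp [firstU, hpr]
    | succ p' =>
      have hc : ¬(c = '|' ∧ prev ≠ some '\\') := by
        have h0 := hmin 0 (Nat.succ_pos _)
        simp only [List.getElem?_cons_zero, ne_eq, Option.some.injEq] at h0
        exact fun hcc => h0 hcc.1
      simp only [List.getElem?_cons_succ] at hp
      have hmin' : ∀ q < p', cs[q]? ≠ some '|' := fun q hq => hmin (q + 1) (by omega)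
      have hsh : (if p' + 1 = 0 then prev else (c :: cs)[p' + 1 - 1]?) =
          (if p' = 0 then some c else cs[p' - 1]?) := by
        cases p' <;> simp
      rw [hsh]
      simp only [firstU]
      rw [if_neg hc, ih p' (some c) hp hmin']
      by_cases hesc : (if p' = 0 then some c else cs[p' - 1]?) = some '\\'
      · rw [if_pos hesc, if_pos hesc]
        simp only [List.drop_succ_cons, Option.map_map]
        cases firstU (some '|') (cs.drop (p' + 1)) with
        | none => simp
        | some a =>
          simp only [Option.map_some, Option.some.injEq, Function.comp_apply]
          omega
      · rw [if_neg hesc, if_neg hesc]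
        simp

theorem firstU_mem (prev : Option Char) (l : List Char) (j : Nat)
    (h : firstU prev l = some j) : l[j]? = some '|' ∧ j < l.length := by
  induction l generalizing prev j with
  | nil => simp [firstU] at h
  | cons c cs ih =>
    simp only [firstU] at h
    split at h
    · rename_i hcond
      cases h
      simp [hcond.1]
    · cases hj : firstU (some c) cs with
      | none => simp [hj] at h
      | some j' =>
        simp only [hj, Option.map_some, Option.some.injEq] at h
        subst h
        have := ih (some c) j' hj
        simpa using this

theorem resplitPipe_ne_nil (prev : Option Char) (l : List Char) :
    resplitPipe prev l ≠ [] := by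
  cases l with
  | nil => simp [resplitPipe]
  | cons c cs =>
    simp only [resplitPipe]
    split
    · simp
    · split <;> simp

theorem resplitPipe_of_none (prev : Option Char) (l : List Char)
    (h : firstU prev l = none) : resplitPipe prev l = [l] := by
  induction l generalizing prev with
  | nil => rfl
  | cons c cs ih =>
    simp only [firstU] at h
    split at h
    · simp at h
    · rename_i hcond
      have : firstU (some c) cs = none := by
        cases hj : firstU (some c) cs <;> simp [hj] at h ⊢
      rw [resplitPipe, if_neg hcond, ih _ this]

theorem resplitPipe_of_some (prev : Option Char) (l : List Char) (j : Nat)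
    (h : firstU prev l = some j) :
    resplitPipe prev l = l.take j :: resplitPipe (some '|') (l.drop (j + 1)) := by
  induction l generalizing prev j with
  | nil => simp [firstU] at h
  | cons c cs ih =>
    simp only [firstU] at h
    split at h
    · rename_i hcond
      cases h
      simp [resplitPipe, hcond]
    · rename_i hcond
      cases hj : firstU (some c) cs with
      | none => simp [hj] at h
      | some j' =>
        simp only [hj, Option.map_some, Option.some.injEq] at h
        subst h
        rw [resplitPipe, if_neg hcond, ih _ _ hj]
        simp

theorem dropTrail_cons (a : List Char) (L : List (List Char)) (h : L ≠ []) :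
    dropTrail (a :: L) = a :: dropTrail L := by
  have hg : (a :: L).getLast? = L.getLast? := by
    cases L with
    | nil => simp at h
    | cons b M => simp [List.getLast?_cons_cons]
  unfold dropTrail
  rw [hg]
  split <;> simp [List.dropLast_cons_of_ne_nil h]

theorem singleton_prefix_iff (a : Char) (l : List Char) :
    [a] <+: l ↔ l[0]? = some a := by
  cases l with
  | nil => simp
  | cons c cs =>
    constructor
    · rintro ⟨t, ht⟩
      simp only [List.singleton_append] at ht
      cases ht; simp
    · intro h
      simp only [List.getElem?_cons_zero, Option.some.injEq] at h
      exact ⟨cs, by simp [h]⟩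

-- findunescaped computes the first unescaped '|' at or after a Nat start position
theorem findunescapedGo_eq (line : String) (fuel k : Nat)
    (hk : k ≤ line.toList.length) (hf : line.toList.length - k < fuel) :
    findunescapedGo line "|" fuel (k : Int) =
      match firstU (prevA line.toList k) (line.toList.drop k) with
      | none => -1
      | some j => ((k + j : Nat) : Int) := by
  induction fuel generalizing k with
  | zero => omega
  | succ fuel ih =>
    rw [findunescapedGo]
    have hfind : PySem.Str.findFrom line "|" (k : Int) =
        if PySem.Chars.find (line.toList.drop k) ['|'] = -1 then -1
        else (k : Int) + PySem.Chars.find (line.toList.drop k) ['|'] := by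
      rw [PySem.Str.findFrom_eq, show ("|" : String).toList = ['|'] from rfl,
        PySem.Chars.findFrom_natCast _ _ k hk]
    by_cases hF : PySem.Chars.find (line.toList.drop k) ['|'] = -1
    · -- no pipe at or after k
      rw [hfind, if_pos hF]
      have hmem : '|' ∉ line.toList.drop k := by
        rw [PySem.Chars.find_eq_neg_one_iff] at hF
        exact fun hm => hF ((List.singleton_infix_iff _ _).mpr hm)
      rw [firstU_eq_none _ _ hmem]
      norm_num
    · -- first pipe of the suffix at relative position p
      have hge : 0 ≤ PySem.Chars.find (line.toList.drop k) ['|'] := by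
        have := PySem.Chars.neg_one_le_find (line.toList.drop k) ['|']
        omega
      set p := (PySem.Chars.find (line.toList.drop k) ['|']).toNat with hpdef
      have hpv : PySem.Chars.find (line.toList.drop k) ['|'] = (p : Int) := by omega
      obtain ⟨hpre, hminp⟩ := PySem.Chars.find_spec (s := line.toList.drop k) (sub := ['|']) hge
      have hp : (line.toList.drop k)[p]? = some '|' := by
        have := (singleton_prefix_iff '|' ((line.toList.drop k).drop p)).mp hpre
        simpa [List.getElem?_drop] using this
      have hmin : ∀ q < p, (line.toList.drop k)[q]? ≠ some '|' := by
        intro q hq hqv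
        exact hminp q hq ((singleton_prefix_iff '|' _).mpr (by simpa [List.getElem?_drop] using hqv))
      have habs : line.toList[k + p]? = some '|' := by
        simpa [List.getElem?_drop] using hp
      have hkp : k + p < line.toList.length := by
        obtain ⟨h, -⟩ := List.getElem?_eq_some_iff.mp habs
        omega
      rw [hfind, if_neg hF, hpv]
      have hAdd : (k : Int) + (p : Int) = ((k + p : Nat) : Int) := by push_cast; ring
      rw [hAdd]
      have hdecomp := firstU_decomp (line.toList.drop k) p (prevA line.toList k) hp hmin
      have hPR : (if p = 0 then prevA line.toList k else (line.toList.drop k)[p - 1]?) =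
          (if k + p = 0 then none else line.toList[k + p - 1]?) := by
        cases p with
        | zero => simp [prevA]
        | succ q =>
          rw [if_neg (Nat.succ_ne_zero q), if_neg (by omega)]
          rw [List.getElem?_drop]
          congr 1
      rw [hPR] at hdecomp
      by_cases hesc : ((k + p : Nat) : Int) > 0 ∧
          PySem.Str.pyGet? line (((k + p : Nat) : Int) - 1) = some '\\'
      · -- escaped: A restarts after the pipe; firstU skips it the same way
        rw [if_pos hesc]
        have hkp0 : 0 < k + p := by exact_mod_cast hesc.1
        have hprevbs : line.toList[k + p - 1]? = some '\\' := by
          have h2 := hesc.2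
          rw [show ((k + p : Nat) : Int) - 1 = ((k + p - 1 : Nat) : Int) by omega,
            PySem.Str.pyGet?_natCast] at h2
          exact h2
        rw [if_pos (by rw [if_neg (by omega)]; exact hprevbs)] at hdecomp
        have hstep : ((k + p : Nat) : Int) + 1 = ((k + p + 1 : Nat) : Int) := by push_cast; ring
        rw [hstep, ih (k + p + 1) (by omega) (by omega)]
        have hprevpipe : prevA line.toList (k + p + 1) = some '|' := by
          simp [prevA, habs]
        have hdd : line.toList.drop (k + p + 1) = (line.toList.drop k).drop (p + 1) := by
          rw [List.drop_drop]
          congr 1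
        rw [hprevpipe, hdd, hdecomp]
        cases firstU (some '|') ((line.toList.drop k).drop (p + 1)) with
        | none => rfl
        | some j =>
          simp only [Option.map_some]
          push_cast
          ring
      · -- unescaped: A returns this position; it is the first unescaped pipe
        rw [if_neg hesc]
        rw [if_neg (by
          intro hbs
          rcases Nat.eq_zero_or_pos (k + p) with h0 | h0
          · rw [if_pos h0] at hbs; exact absurd hbs (by simp)
          · rw [if_neg (by omega)] at hbs
            exact hesc ⟨by exact_mod_cast h0, by
              rw [show ((k + p : Nat) : Int) - 1 = ((k + p - 1 : Nat) : Int) by omega,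
                PySem.Str.pyGet?_natCast]
              exact hbs⟩)] at hdecomp
        rw [hdecomp]

-- a stopped loop returns its accumulator
theorem splitGoA_stop (line : String) (fuel : Nat) (i : Int) (r : List String)
    (h : ¬ i < PySem.Str.len line) : splitGoA line fuel i r = r := by
  cases fuel with
  | zero => rfl
  | succ n => rw [splitGoA, if_neg h]

theorem dropTrail_single (l : List Char) (h : l ≠ []) : dropTrail [l] = [l] := by
  unfold dropTrail
  simp [h]

theorem slice_elt (line : String) (a b : Nat) :
    PySem.Str.slice line (some (a : Int)) (some (b : Int)) =
      String.ofList ((line.toList.drop a).take (b - a)) := by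
  rw [← String.toList_inj]
  rw [PySem.Str.toList_slice, PySem.Chars.slice_eq_listSlice, PySem.List.slice_natCast,
    String.toList_ofList]

-- main loop correspondence: A's scanner from position i yields the regex-split fields of the
-- remaining suffix, with a trailing empty field dropped
theorem splitGoA_eq (line : String) (fuel i : Nat) (r : List String)
    (hi : i < line.toList.length) (hf : line.toList.length - i < fuel) :
    splitGoA line fuel (i : Int) r =
      r ++ (dropTrail (resplitPipe (prevA line.toList i) (line.toList.drop i))).map String.ofList := by
  induction fuel generalizing i r with
  | zero => omega
  | succ fuel ih =>
    have hlen : PySem.Str.len line = (line.toList.length : Int) := PySem.Str.len_eq line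
    have hfuel : (PySem.Str.len line).toNat + 1 = line.toList.length + 1 := by
      rw [hlen]; simp
    rw [splitGoA, if_pos (by rw [hlen]; exact_mod_cast hi)]
    cases hU : firstU (prevA line.toList i) (line.toList.drop i) with
    | none =>
      have hfe : findunescaped line "|" (i : Int) = -1 := by
        rw [findunescaped, hfuel,
          findunescapedGo_eq line _ i (le_of_lt hi) (by omega), hU]
      simp only [hfe]
      rw [if_pos (by norm_num)]
      rw [splitGoA_stop _ _ _ _ (by rw [hlen]; omega)]
      rw [resplitPipe_of_none _ _ hU,
        dropTrail_single _ (by intro h; rw [List.drop_eq_nil_iff] at h; omega)]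
      have helt : PySem.Str.slice line (some (i : Int)) (some (PySem.Str.len line)) =
          String.ofList (line.toList.drop i) := by
        rw [hlen, show ((line.toList.length : Nat) : Int) = ((line.toList.length : Nat) : Int) from rfl,
          slice_elt]
        congr 1
        exact List.take_of_length_le (by simp)
      rw [helt]
      rfl
    | some jr =>
      obtain ⟨hpj, hjlt⟩ := firstU_mem _ _ _ hU
      have hij : i + jr < line.toList.length := by
        rw [List.length_drop] at hjlt; omega
      have habs : line.toList[i + jr]? = some '|' := by
        simpa [List.getElem?_drop] using hpj
      have hfe : findunescaped line "|" (i : Int) = ((i + jr : Nat) : Int) := by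
        rw [findunescaped, hfuel,
          findunescapedGo_eq line _ i (le_of_lt hi) (by omega), hU]
      simp only [hfe]
      rw [if_neg (by omega)]
      have hcast : ((i + jr : Nat) : Int) + 1 = ((i + jr + 1 : Nat) : Int) := by push_cast; ring
      rw [hcast]
      have helt : PySem.Str.slice line (some (i : Int)) (some ((i + jr : Nat) : Int)) =
          String.ofList ((line.toList.drop i).take jr) := by
        have hsub : i + jr - i = jr := by omega
        rw [slice_elt, hsub]
      rw [resplitPipe_of_some _ _ _ hU]
      have hdd : (line.toList.drop i).drop (jr + 1) = line.toList.drop (i + jr + 1) := by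
        rw [List.drop_drop]; congr 1
      rw [hdd]
      by_cases hend : i + jr + 1 < line.toList.length
      · rw [ih (i + jr + 1) _ hend (by omega)]
        have hprev : prevA line.toList (i + jr + 1) = some '|' := by
          simp [prevA, habs]
        rw [hprev, dropTrail_cons _ _ (resplitPipe_ne_nil _ _), helt]
        simp
      · have hdropnil : line.toList.drop (i + jr + 1) = [] := by
          rw [List.drop_eq_nil_iff]; omega
        rw [splitGoA_stop _ _ _ _ (by rw [hlen]; push_cast; omega)]
        rw [hdropnil, helt]
        simp [resplitPipe, dropTrail]

-- the two leading-pipe guards test and build the same string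
theorem guard1_eq (u : String) :
    (if PySem.Str.len u > 0 ∧ PySem.Str.pyGet? u 0 = some '|' then
        PySem.Str.slice u (some 1) none else u) =
    (if PySem.Str.startswith u "|" then PySem.Str.slice u (some 1) none else u) := by
  have hlen : PySem.Str.len u = (u.toList.length : Int) := PySem.Str.len_eq u
  have hg : PySem.Str.pyGet? u 0 = u.toList[0]? := by
    exact_mod_cast PySem.Str.pyGet?_natCast u 0
  have hsw : PySem.Str.startswith u "|" = true ↔ u.toList[0]? = some '|' := by
    rw [PySem.Str.startswith_eq, show ("|" : String).toList = ['|'] from rfl,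
      PySem.Chars.startswith_iff, singleton_prefix_iff]
  by_cases h : u.toList[0]? = some '|'
  · rw [if_pos, if_pos (hsw.mpr h)]
    refine ⟨?_, by rw [hg]; exact h⟩
    have : 0 < u.toList.length := by
      rcases List.getElem?_eq_some_iff.mp h with ⟨hh, -⟩; omega
    omega
  · rw [if_neg, if_neg (by intro hc; exact h (hsw.mp hc))]
    intro hc
    exact h (by rw [← hg]; exact hc.2)

theorem opt_map_singleton_ne (o : Option Char) :
    ¬ (o.map (fun c => [c]) = some ['\\', '|']) := by
  cases o <;> simp

theorem singleton_suffix_iff (a : Char) (l : List Char) :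
    [a] <:+ l ↔ l.reverse[0]? = some a := by
  constructor
  · rintro ⟨t, rfl⟩
    simp
  · intro h
    have hl : 0 < l.length := by
      rcases List.getElem?_eq_some_iff.mp h with ⟨hh, -⟩
      simp at hh; omega
    refine List.suffix_iff_eq_drop.mpr ?_
    rw [List.getElem?_reverse (by omega)] at h
    rcases List.getElem?_eq_some_iff.mp h with ⟨hh, hv⟩
    simp only [List.length_cons, List.length_nil]
    rw [List.drop_eq_getElem_cons (by omega)]
    simp only [Nat.zero_add]
    congr 1
    · rw [← hv]
      congr 1
    · symm; rw [List.drop_eq_nil_iff]; omega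

theorem pyGet_neg_one (l : List Char) (h : 0 < l.length) :
    PySem.List.pyGet? l (-1) = l[l.length - 1]? := by
  simp only [PySem.List.pyGet?, PySem.List.pyIdx?]
  norm_num
  rw [if_pos (by omega)]
  simp

-- the two trailing-pipe guards test and build the same string
theorem guard2_eq (v : String) :
    (if PySem.Str.len v > 1 ∧ PySem.Str.pyGet? v (-1) = some '|' ∧
        ¬ ((PySem.Str.pyGet? v (-2)).map (fun c => [c]) = some ['\\', '|']) then
      PySem.Str.slice v (some 0) (some (PySem.Str.len v - 1))
    else v) =
    (if PySem.Str.len v > 1 ∧ PySem.Str.endswith v "|" then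
      PySem.Str.slice v none (some (-1))
    else v) := by
  have hlen : PySem.Str.len v = (v.toList.length : Int) := PySem.Str.len_eq v
  by_cases hl : 1 < v.toList.length
  · have hneg : PySem.Str.pyGet? v (-1) = v.toList[v.toList.length - 1]? := by
      rw [PySem.Str.pyGet?_eq, PySem.Chars.pyGet?_eq_listPyGet?, pyGet_neg_one _ (by omega)]
    have hew : PySem.Str.endswith v "|" = true ↔ v.toList[v.toList.length - 1]? = some '|' := by
      rw [PySem.Str.endswith_eq, show ("|" : String).toList = ['|'] from rfl,
        PySem.Chars.endswith_iff, singleton_suffix_iff,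
        List.getElem?_reverse (by omega)]
      norm_num
    by_cases hp : v.toList[v.toList.length - 1]? = some '|'
    · rw [if_pos ⟨by omega, by rw [hneg]; exact hp, opt_map_singleton_ne _⟩,
        if_pos ⟨by omega, hew.mpr hp⟩]
      rw [← String.toList_inj, PySem.Str.slice_to_neg_one, PySem.Str.toList_slice,
        PySem.Chars.slice_eq_listSlice, hlen]
      rw [show (0 : Int) = ((0 : Nat) : Int) from rfl,
        show ((v.toList.length : Nat) : Int) - 1 = ((v.toList.length - 1 : Nat) : Int) by omega,
        PySem.List.slice_natCast]
      simp [List.dropLast_eq_take]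
    · rw [if_neg (fun hc => hp (by rw [← hneg]; exact hc.2.1)),
        if_neg (fun hc => hp (hew.mp hc.2))]
  · rw [if_neg (by rw [hlen]; intro hc; omega), if_neg (by rw [hlen]; intro hc; omega)]

-- the whole pipeline after the (identical) guards
theorem core_eq (w : String) :
    splitGoA w ((PySem.Str.len w).toNat + 1) 0 [] =
      (if w = "" then []
       else
        let parts := (resplitPipe none w.toList).map String.ofList
        if parts.getLast? = some "" then parts.dropLast else parts) := by
  have hlen : PySem.Str.len w = (w.toList.length : Int) := PySem.Str.len_eq w
  by_cases hw : w.toList = []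
  · have hw' : w = "" := String.toList_inj.mp (by rw [hw]; rfl)
    rw [if_pos hw']
    exact splitGoA_stop _ _ _ _ (by rw [hlen, hw]; simp)
  · have hw' : ¬ w = "" := fun h => hw (by rw [h]; rfl)
    rw [if_neg hw']
    have h0 : (0 : Int) = ((0 : Nat) : Int) := rfl
    have hpos : 0 < w.toList.length := List.length_pos_of_ne_nil hw
    rw [h0, splitGoA_eq w _ 0 [] hpos (by rw [hlen]; omega)]
    rw [show prevA w.toList 0 = none from rfl, List.drop_zero, List.nil_append]
    -- commute the map with the trailing-empty pop
    have hne := resplitPipe_ne_nil none w.toList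
    set L := resplitPipe none w.toList with hL
    show (dropTrail L).map String.ofList =
      (if (L.map String.ofList).getLast? = some "" then (L.map String.ofList).dropLast
       else L.map String.ofList)
    have hlast : (L.map String.ofList).getLast? = L.getLast?.map String.ofList := by
      simp [List.getLast?_map]
    by_cases hE : L.getLast? = some []
    · rw [if_pos (by rw [hlast, hE]; rfl)]
      unfold dropTrail
      rw [if_pos hE, List.map_dropLast]
    · rw [if_neg (by
        rw [hlast]
        intro hc
        cases hLl : L.getLast? with
        | none => rw [hLl] at hc; simp at hc
        | some x =>
          rw [hLl] at hc
          simp only [Option.map_some, Option.some.injEq] at hc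
          apply hE
          rw [hLl]
          have : x = [] := by
            have := congrArg String.toList hc
            simpa using this
          rw [this])]
      unfold dropTrail
      rw [if_neg hE]

-- ===== VERDICT (by name: the statement is the Claim_ definition above) =====
theorem splittablecols_spec : Claim_equal_splittablecols := by
  intro line _
  simp only [Spec_splittablecols, splittablecols, splittablecols_alt]
  rw [guard1_eq, guard2_eq, core_eq]
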